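-- pv_equiv track=rewrite | github.com/serafinmoral/tablasat | comunes.py | reduceplus
-- ===== SOURCE A (Python) =====
-- def reduceplus(clau,x):
--         h = []
--         cont = set()
--         for y in clau:
--             if y in x:
--                 h = [0]
--                 cont = {y}
--                 break
--             elif -y not in x:
--                 h.append(y)
--             else:
--                 cont.add(y)
--
--         return (frozenset(h),cont)
-- ===== SOURCE B (Python) =====
-- def reduceplus(clau, x):
--     # search pass: first literal satisfied by x
--     for y in clau:
--         if y in x:
--             return (frozenset([0]), {y})
--     # partition pass
--     h = [y for y in clau if -y not in x]
--     cont = {y for y in clau if -y in x}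
--     return (frozenset(h), cont)
-- ===== Notes on version B (the rewrite author's own statement) =====
-- stated objective: simpler
-- what changed: A's single early-break loop with interleaved accumulators is replaced by a separate search pass for the first satisfied literal followed by two independent partition comprehensions.
import Mathlib
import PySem

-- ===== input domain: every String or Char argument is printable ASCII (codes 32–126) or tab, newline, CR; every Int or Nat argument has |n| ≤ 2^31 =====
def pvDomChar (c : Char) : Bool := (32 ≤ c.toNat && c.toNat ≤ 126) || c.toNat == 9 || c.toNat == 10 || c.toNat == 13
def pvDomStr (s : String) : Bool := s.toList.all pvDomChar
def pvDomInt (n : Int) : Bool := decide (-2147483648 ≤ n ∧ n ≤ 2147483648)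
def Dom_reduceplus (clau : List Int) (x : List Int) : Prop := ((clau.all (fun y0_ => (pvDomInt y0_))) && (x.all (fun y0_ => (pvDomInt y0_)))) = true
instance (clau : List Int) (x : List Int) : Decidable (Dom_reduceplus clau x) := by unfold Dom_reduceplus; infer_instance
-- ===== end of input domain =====

-- B replaces A's single early-break loop by a search pass for the first satisfied
-- literal followed by two independent partition passes (objective: simpler).


-- ===== PORT A =====
-- loop over clau with accumulators h (a list) and cont (a Python set)
def reduceplusLoopA (x : List Int) : List Int → List Int → PySem.Set Int → List Int × List Int
  | [], h, cont => (PySem.Set.ofList h, cont)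
  | y :: ys, h, cont =>
    if x.contains y then (PySem.Set.ofList [0], PySem.Set.add PySem.Set.empty y)
    else if !x.contains (-y) then reduceplusLoopA x ys (h ++ [y]) cont
    else reduceplusLoopA x ys h (PySem.Set.add cont y)

def reduceplus (clau : List Int) (x : List Int) : List Int × List Int :=
  reduceplusLoopA x clau [] PySem.Set.empty

-- ===== PORT B =====
def reduceplus_alt (clau : List Int) (x : List Int) : List Int × List Int :=
  match clau.find? (fun y => x.contains y) with
  | some y => (PySem.Set.ofList [0], PySem.Set.add PySem.Set.empty y)
  | none =>
    (PySem.Set.ofList (clau.filter (fun y => !x.contains (-y))),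
     PySem.Set.ofList (clau.filter (fun y => x.contains (-y))))

-- ===== PRECONDITION & SPEC =====
def Spec_reduceplus (clau : List Int) (x : List Int) (out : List Int × List Int) : Prop := out = reduceplus_alt clau x
instance (clau : List Int) (x : List Int) (out : List Int × List Int) : Decidable (Spec_reduceplus clau x out) := by unfold Spec_reduceplus; infer_instance

-- ===== CLAIM (what is proved, stated in full; the proofs are below) =====
def Claim_equal_reduceplus : Prop := ∀ (clau : List Int) (x : List Int), Dom_reduceplus clau x → Spec_reduceplus clau x (reduceplus clau x)

-- ===== LEMMAS AND PROOFS =====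
lemma reduceplusLoopA_eq (x : List Int) : ∀ (clau h : List Int) (cont : PySem.Set Int),
    reduceplusLoopA x clau h cont =
      match clau.find? (fun y => x.contains y) with
      | some y => (PySem.Set.ofList [0], PySem.Set.add PySem.Set.empty y)
      | none =>
        (PySem.Set.ofList (h ++ clau.filter (fun y => !x.contains (-y))),
         (clau.filter (fun y => x.contains (-y))).foldl PySem.Set.add cont)
  | [], h, cont => by simp [reduceplusLoopA]
  | y :: ys, h, cont => by
    by_cases hy : y ∈ x
    · simp [reduceplusLoopA, hy, List.find?]
    · by_cases hny : -y ∈ x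
      · simp [reduceplusLoopA, hy, hny, List.find?, List.filter,
          reduceplusLoopA_eq x ys h (PySem.Set.add cont y)]
      · simp only [reduceplusLoopA, List.contains_eq_mem, hy, hny, decide_false,
          Bool.not_false, if_true, List.find?, List.filter,
          reduceplusLoopA_eq x ys (h ++ [y]) cont]
        simp [List.append_assoc]

-- ===== VERDICT (by name: the statement is the Claim_ definition above) =====
theorem reduceplus_spec : Claim_equal_reduceplus := by
  intro clau x _
  unfold Spec_reduceplus reduceplus reduceplus_alt
  rw [reduceplusLoopA_eq]
  cases clau.find? (fun y => x.contains y) with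
  | some y => rfl
  | none => simp [PySem.Set.ofList_eq_foldl]
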